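-- pv_equiv track=rewrite | github.com/TUMAOB/tgbotmain | core/utils.py | get_country_from_domain
-- ===== SOURCE A (Python) =====
-- def get_country_from_domain(hostname: str) -> str:
--     """
--     Determine country based on site domain TLD.
--
--     Args:
--         hostname: Website hostname
--
--     Returns:
--         2-letter country code
--     """
--     hostname = hostname.lower()
--
--     domain_country_map = {
--         '.co.uk': 'GB',
--         '.au': 'AU',
--         '.ca': 'CA',
--         '.co.nz': 'NZ',
--         '.nz': 'NZ',
--         '.jp': 'JP',
--         '.ph': 'PH',
--         '.my': 'MY',
--         '.sg': 'SG',
--         '.th': 'TH',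
--         '.nl': 'NL',
--         '.hk': 'HK',
--         '.co.za': 'ZA',
--         '.de': 'DE',
--         '.fr': 'FR',
--         '.it': 'IT',
--         '.es': 'ES',
--     }
--
--     for suffix, country in domain_country_map.items():
--         if hostname.endswith(suffix):
--             return country
--
--     return 'US'  # Default to US
-- ===== SOURCE B (Python) =====
-- def get_country_from_domain(hostname: str) -> str:
--     """Country from TLD via fixed-width tail slices and a two-stage lookup."""
--     h = hostname.lower()
--     second_level = {'.uk': 'GB', '.za': 'ZA'}
--     top_level = {'.au': 'AU', '.ca': 'CA', '.nz': 'NZ', '.jp': 'JP', '.ph': 'PH',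
--                  '.my': 'MY', '.sg': 'SG', '.th': 'TH', '.nl': 'NL', '.hk': 'HK',
--                  '.de': 'DE', '.fr': 'FR', '.it': 'IT', '.es': 'ES'}
--     tail = h[-3:]
--     if tail in second_level:
--         return second_level[tail] if h[-6:-3] == '.co' else 'US'
--     return top_level.get(tail, 'US')
-- ===== Notes on version B (the rewrite author's own statement) =====
-- stated objective: alternative
-- what changed: Instead of testing the hostname with endswith against all 17 dotted suffixes in dict order, B slices the last three characters once and resolves them by a two-stage dict lookup (a second-level table for .uk/.za that checks h[-6:-3]=='.co', and a flat TLD table for the rest).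
import Mathlib
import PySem

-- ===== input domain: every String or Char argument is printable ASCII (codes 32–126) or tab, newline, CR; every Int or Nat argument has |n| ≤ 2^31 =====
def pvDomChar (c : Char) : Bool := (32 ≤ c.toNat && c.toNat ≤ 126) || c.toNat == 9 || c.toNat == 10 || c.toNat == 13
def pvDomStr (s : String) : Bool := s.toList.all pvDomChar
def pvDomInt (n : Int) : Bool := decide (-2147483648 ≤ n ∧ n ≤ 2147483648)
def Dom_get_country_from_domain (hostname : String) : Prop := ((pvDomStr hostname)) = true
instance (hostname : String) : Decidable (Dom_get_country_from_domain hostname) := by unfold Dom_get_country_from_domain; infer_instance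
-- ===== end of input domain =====

-- B replaces A's endswith scan over 17 dotted suffixes by fixed-width tail slices and a
-- two-stage dict lookup keyed by the last three characters; objective: alternative.

-- ===== PORT A =====
-- the dict literal of A, in insertion order
def pvMap : List (String × String) :=
  [(".co.uk", "GB"), (".au", "AU"), (".ca", "CA"), (".co.nz", "NZ"), (".nz", "NZ"),
   (".jp", "JP"), (".ph", "PH"), (".my", "MY"), (".sg", "SG"), (".th", "TH"),
   (".nl", "NL"), (".hk", "HK"), (".co.za", "ZA"), (".de", "DE"), (".fr", "FR"),
   (".it", "IT"), (".es", "ES")]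

-- the for-loop over domain_country_map.items() with early return
def pvLoopA : List (String × String) → String → String
  | [], _ => "US"
  | (suffix, country) :: rest, h =>
      if PySem.Str.endswith h suffix then country else pvLoopA rest h

def get_country_from_domain (hostname : String) : String :=
  pvLoopA pvMap (PySem.Str.lower hostname)

-- ===== PORT B =====
def pvSecondLevel : PySem.Dict String String :=
  PySem.Dict.ofList [(".uk", "GB"), (".za", "ZA")]

def pvTopLevel : PySem.Dict String String :=
  PySem.Dict.ofList
    [(".au", "AU"), (".ca", "CA"), (".nz", "NZ"), (".jp", "JP"), (".ph", "PH"),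
     (".my", "MY"), (".sg", "SG"), (".th", "TH"), (".nl", "NL"), (".hk", "HK"),
     (".de", "DE"), (".fr", "FR"), (".it", "IT"), (".es", "ES")]

def get_country_from_domain_alt (hostname : String) : String :=
  let h := PySem.Str.lower hostname
  let tail := PySem.Str.slice h (some (-3)) none          -- h[-3:]
  match pvSecondLevel.get? tail with
  | some cc => if PySem.Str.slice h (some (-6)) (some (-3)) == ".co" then cc else "US"
  | none => pvTopLevel.getD tail "US"

-- ===== PRECONDITION & SPEC =====
def Spec_get_country_from_domain (hostname : String) (out : String) : Prop := out = get_country_from_domain_alt hostname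
instance (hostname : String) (out : String) : Decidable (Spec_get_country_from_domain hostname out) := by unfold Spec_get_country_from_domain; infer_instance

-- ===== CLAIM (what is proved, stated in full; the proofs are below) =====
def Claim_equal_get_country_from_domain : Prop := ∀ (hostname : String), Dom_get_country_from_domain hostname → Spec_get_country_from_domain hostname (get_country_from_domain hostname)

-- ===== LEMMAS AND PROOFS =====

-- endswith as an equality of the length-matched tail slice
theorem pv_endswith_eq_decide (h k : String) :
    PySem.Str.endswith h k
      = decide (h.toList.drop (h.toList.length - k.toList.length) = k.toList) := by
  apply Bool.eq_iff_iff.mpr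
  rw [PySem.Str.endswith_eq, PySem.Chars.endswith_iff, decide_eq_true_eq]
  constructor
  · intro hs
    exact (List.suffix_iff_eq_drop.mp hs).symm
  · intro he
    rw [← he]
    exact List.drop_suffix _ _

-- the last-6 slice splits as the (-6,-3) slice followed by the (-3,) slice
theorem pv_drop6_eq (l : List Char) :
    l.drop (l.length - 6)
      = (l.drop (l.length - 6)).take ((l.length - 3) - (l.length - 6))
        ++ l.drop (l.length - 3) := by
  conv_lhs => rw [← List.take_append_drop ((l.length - 3) - (l.length - 6)) (l.drop (l.length - 6))]
  congr 1
  rw [List.drop_drop]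
  congr 1
  omega

-- an equation between two ≤3 ++ ≤3 lists and two 3 ++ 3 literals splits componentwise
theorem pv_split6 {m t u v : List Char} (hm : m.length ≤ 3) (ht : t.length ≤ 3)
    (hu : u.length = 3) (hv : v.length = 3) :
    m ++ t = u ++ v ↔ m = u ∧ t = v := by
  constructor
  · intro he
    have hlen : m.length + t.length = u.length + v.length := by
      have := congrArg List.length he
      simpa using this
    exact List.append_inj he (by omega)
  · rintro ⟨rfl, rfl⟩; rfl

theorem pv_ends3 (h k : String) (hk : k.toList.length = 3) :
    (PySem.Str.endswith h k = true)
      = (h.toList.drop (h.toList.length - 3) = k.toList) := by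
  rw [pv_endswith_eq_decide, hk, decide_eq_true_eq]

theorem pv_ends6 (h k u v : String) (hk : k.toList = u.toList ++ v.toList)
    (hu : u.toList.length = 3) (hv : v.toList.length = 3) :
    (PySem.Str.endswith h k = true)
      = ((h.toList.drop (h.toList.length - 6)).take ((h.toList.length - 3) - (h.toList.length - 6)) = u.toList
         ∧ h.toList.drop (h.toList.length - 3) = v.toList) := by
  have hk6 : k.toList.length = 6 := by rw [hk]; simp [hu, hv]
  rw [pv_endswith_eq_decide, hk6, decide_eq_true_eq, hk]
  apply propext
  conv_lhs => rw [pv_drop6_eq]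
  refine pv_split6 ?_ ?_ hu hv
  · rw [List.length_take]; omega
  · rw [List.length_drop]; omega

-- String equality via toList
theorem pv_str_eq_iff (s t : String) : s = t ↔ s.toList = t.toList := by
  constructor
  · intro h; rw [h]
  · intro h
    have := congrArg String.ofList h
    simpa [String.ofList_toList] using this

-- the common decision table, over the two tail slices as strings
theorem pv_tab_str (tl md : String) :
    (if md = ".co" ∧ ".uk" = tl then "GB"
       else if ".au" = tl then "AU"
       else if ".ca" = tl then "CA"
       else if md = ".co" ∧ ".nz" = tl then "NZ"
       else if ".nz" = tl then "NZ"
       else if ".jp" = tl then "JP"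
       else if ".ph" = tl then "PH"
       else if ".my" = tl then "MY"
       else if ".sg" = tl then "SG"
       else if ".th" = tl then "TH"
       else if ".nl" = tl then "NL"
       else if ".hk" = tl then "HK"
       else if md = ".co" ∧ ".za" = tl then "ZA"
       else if ".de" = tl then "DE"
       else if ".fr" = tl then "FR"
       else if ".it" = tl then "IT"
       else if ".es" = tl then "ES"
       else "US")
  = (if ".uk" = tl then (if md = ".co" then "GB" else "US")
       else if ".za" = tl then (if md = ".co" then "ZA" else "US")
       else if ".au" = tl then "AU"
       else if ".ca" = tl then "CA"
       else if ".nz" = tl then "NZ"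
       else if ".jp" = tl then "JP"
       else if ".ph" = tl then "PH"
       else if ".my" = tl then "MY"
       else if ".sg" = tl then "SG"
       else if ".th" = tl then "TH"
       else if ".nl" = tl then "NL"
       else if ".hk" = tl then "HK"
       else if ".de" = tl then "DE"
       else if ".fr" = tl then "FR"
       else if ".it" = tl then "IT"
       else if ".es" = tl then "ES"
       else "US") := by
  by_cases h1 : ".uk" = tl
  · simp [← h1]
  by_cases h2 : ".za" = tl
  · simp [← h2]
  by_cases h3 : ".au" = tl
  · simp [← h3]
  by_cases h4 : ".ca" = tl
  · simp [← h4]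
  by_cases h5 : ".nz" = tl
  · simp [← h5]
  by_cases h6 : ".jp" = tl
  · simp [← h6]
  by_cases h7 : ".ph" = tl
  · simp [← h7]
  by_cases h8 : ".my" = tl
  · simp [← h8]
  by_cases h9 : ".sg" = tl
  · simp [← h9]
  by_cases h10 : ".th" = tl
  · simp [← h10]
  by_cases h11 : ".nl" = tl
  · simp [← h11]
  by_cases h12 : ".hk" = tl
  · simp [← h12]
  by_cases h13 : ".de" = tl
  · simp [← h13]
  by_cases h14 : ".fr" = tl
  · simp [← h14]
  by_cases h15 : ".it" = tl
  · simp [← h15]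
  by_cases h16 : ".es" = tl
  · simp [← h16]
  simp [h1, h2, h3, h4, h5, h6, h7, h8, h9, h10, h11, h12, h13, h14, h15, h16]

-- dict.get(k, default) through get?
theorem pv_getD_eq (d : PySem.Dict String String) (k dflt : String) :
    d.getD k dflt = (d.get? k).getD dflt := rfl

-- B's two-stage lookup, evaluated to the string-level decision chain
theorem pv_alt_eval (tl md : String) :
    (match pvSecondLevel.get? tl with
     | some cc => if md == ".co" then cc else "US"
     | none => pvTopLevel.getD tl "US")
  = (if ".uk" = tl then (if md = ".co" then "GB" else "US")
       else if ".za" = tl then (if md = ".co" then "ZA" else "US")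
       else if ".au" = tl then "AU"
       else if ".ca" = tl then "CA"
       else if ".nz" = tl then "NZ"
       else if ".jp" = tl then "JP"
       else if ".ph" = tl then "PH"
       else if ".my" = tl then "MY"
       else if ".sg" = tl then "SG"
       else if ".th" = tl then "TH"
       else if ".nl" = tl then "NL"
       else if ".hk" = tl then "HK"
       else if ".de" = tl then "DE"
       else if ".fr" = tl then "FR"
       else if ".it" = tl then "IT"
       else if ".es" = tl then "ES"
       else "US") := by
  have h2 : pvSecondLevel.get? tl
      = (if ".uk" = tl then some "GB" else if ".za" = tl then some "ZA" else none) := by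
    have e : pvSecondLevel = PySem.Dict.mk [(".uk", "GB"), (".za", "ZA")] := by decide
    rw [e, PySem.Dict.get?_mk_cons, PySem.Dict.get?_mk_cons]
    simp [beq_iff_eq, PySem.Dict.get?]
  have htop : pvTopLevel.getD tl "US"
      = (if ".au" = tl then "AU"
         else if ".ca" = tl then "CA"
         else if ".nz" = tl then "NZ"
         else if ".jp" = tl then "JP"
         else if ".ph" = tl then "PH"
         else if ".my" = tl then "MY"
         else if ".sg" = tl then "SG"
         else if ".th" = tl then "TH"
         else if ".nl" = tl then "NL"
         else if ".hk" = tl then "HK"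
         else if ".de" = tl then "DE"
         else if ".fr" = tl then "FR"
         else if ".it" = tl then "IT"
         else if ".es" = tl then "ES"
         else "US") := by
    have e : pvTopLevel = PySem.Dict.mk [(".au", "AU"), (".ca", "CA"), (".nz", "NZ"), (".jp", "JP"), (".ph", "PH"), (".my", "MY"), (".sg", "SG"), (".th", "TH"), (".nl", "NL"), (".hk", "HK"), (".de", "DE"), (".fr", "FR"), (".it", "IT"), (".es", "ES")] := by decide
    have hget : pvTopLevel.get? tl
        = (if ".au" = tl then some "AU" else if ".ca" = tl then some "CA"
           else if ".nz" = tl then some "NZ" else if ".jp" = tl then some "JP"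
           else if ".ph" = tl then some "PH" else if ".my" = tl then some "MY"
           else if ".sg" = tl then some "SG" else if ".th" = tl then some "TH"
           else if ".nl" = tl then some "NL" else if ".hk" = tl then some "HK"
           else if ".de" = tl then some "DE" else if ".fr" = tl then some "FR"
           else if ".it" = tl then some "IT" else if ".es" = tl then some "ES"
           else none) := by
      rw [e, PySem.Dict.get?_mk_cons, PySem.Dict.get?_mk_cons, PySem.Dict.get?_mk_cons,
        PySem.Dict.get?_mk_cons, PySem.Dict.get?_mk_cons, PySem.Dict.get?_mk_cons,
        PySem.Dict.get?_mk_cons, PySem.Dict.get?_mk_cons, PySem.Dict.get?_mk_cons,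
        PySem.Dict.get?_mk_cons, PySem.Dict.get?_mk_cons, PySem.Dict.get?_mk_cons,
        PySem.Dict.get?_mk_cons, PySem.Dict.get?_mk_cons]
      simp [beq_iff_eq, PySem.Dict.get?]
    rw [pv_getD_eq, hget]
    simp only [apply_ite (fun o : Option String => o.getD "US"), Option.getD_some, Option.getD_none]
  rw [h2]
  by_cases c1 : ".uk" = tl
  · simp [c1, beq_iff_eq]
  by_cases c2 : ".za" = tl
  · simp [c1, c2, beq_iff_eq]
  simp [c1, c2, htop]

-- main combinational fact: A's endswith chain equals B's two-stage lookup
set_option maxHeartbeats 1600000 in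
theorem pv_main (h : String) :
    pvLoopA pvMap h
      = (match pvSecondLevel.get? (PySem.Str.slice h (some (-3)) none) with
         | some cc => if PySem.Str.slice h (some (-6)) (some (-3)) == ".co" then cc else "US"
         | none => pvTopLevel.getD (PySem.Str.slice h (some (-3)) none) "US") := by
  have htl : (PySem.Str.slice h (some (-3)) none).toList
      = h.toList.drop (h.toList.length - 3) := by
    simp [PySem.List.slice_from_neg_ofNat h.toList 3 (by omega)]
  have hmd : (PySem.Str.slice h (some (-6)) (some (-3))).toList
      = (h.toList.drop (h.toList.length - 6)).take ((h.toList.length - 3) - (h.toList.length - 6)) := by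
    have : PySem.List.slice h.toList (some (-6)) (some (-3))
        = (h.toList.drop (h.toList.length - 6)).take ((h.toList.length - 3) - (h.toList.length - 6)) := by
      unfold PySem.List.slice
      simp
    simp [this]
  have pvE3 : ∀ (k : String), k.toList.length = 3 →
      ((PySem.Str.endswith h k = true) = (k = PySem.Str.slice h (some (-3)) none)) := by
    intro k hk
    rw [pv_ends3 h k hk]
    apply propext
    rw [pv_str_eq_iff, htl]
    exact ⟨fun h' => h'.symm, fun h' => h'.symm⟩
  have pvE6 : ∀ (k u v : String), k.toList = u.toList ++ v.toList →
      u.toList.length = 3 → v.toList.length = 3 →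
      ((PySem.Str.endswith h k = true)
        = ((PySem.Str.slice h (some (-6)) (some (-3)) = u) ∧ (v = PySem.Str.slice h (some (-3)) none))) := by
    intro k u v hk hu hv
    rw [pv_ends6 h k u v hk hu hv]
    apply propext
    rw [pv_str_eq_iff (PySem.Str.slice h (some (-6)) (some (-3))) u, hmd]
    rw [pv_str_eq_iff v _, htl]
    exact ⟨fun ⟨a, b⟩ => ⟨a, b.symm⟩, fun ⟨a, b⟩ => ⟨a, b.symm⟩⟩
  rw [pv_alt_eval (PySem.Str.slice h (some (-3)) none) (PySem.Str.slice h (some (-6)) (some (-3)))]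
  simp only [pvLoopA, pvMap]
  simp only [pvE6 ".co.uk" ".co" ".uk" (by decide) (by decide) (by decide), pvE6 ".co.nz" ".co" ".nz" (by decide) (by decide) (by decide), pvE6 ".co.za" ".co" ".za" (by decide) (by decide) (by decide), pvE3 ".au" (by decide), pvE3 ".ca" (by decide), pvE3 ".nz" (by decide), pvE3 ".jp" (by decide), pvE3 ".ph" (by decide), pvE3 ".my" (by decide), pvE3 ".sg" (by decide), pvE3 ".th" (by decide), pvE3 ".nl" (by decide), pvE3 ".hk" (by decide), pvE3 ".de" (by decide), pvE3 ".fr" (by decide), pvE3 ".it" (by decide), pvE3 ".es" (by decide)]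
  exact pv_tab_str (PySem.Str.slice h (some (-3)) none) (PySem.Str.slice h (some (-6)) (some (-3)))

-- ===== VERDICT (by name: the statement is the Claim_ definition above) =====
theorem get_country_from_domain_spec : Claim_equal_get_country_from_domain := by
  intro hostname _
  unfold Spec_get_country_from_domain get_country_from_domain get_country_from_domain_alt
  exact pv_main (PySem.Str.lower hostname)
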